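/- GENERATED by farm/mkstatement.py from design/units.tsv (unit `DGifDecompressLine.P`) and the assertions of Gif/Spec/Seg_DGifDecompressLine.lean — do not edit.
   THE STATEMENT of the proof unit `DGifDecompressLine.P`: segment P of `DGifDecompressLine` (19 instructions; entries 0x106ae0;
   exits 0x106b3d; ranges 0x106ae0-0x106b3d)
   takes each of its entry assertions to one of its exit assertions (`Gif.Spec.DGifDecompressLine.SegP`), given the contracts of its callees.
   What the names mean: ProgX/Base/Spec/Basic.lean (the shared hypotheses), Gif/Spec/Seg_DGifDecompressLine.lean (the assertions). The theorem to prove: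
   `theorem DGifDecompressLine_P_ok : Gif.Spec.DGifDecompressLine_P.Statement`. -/
import Gif.Code
import Gif.Dec.All
import Gif.Labels
import Gif.Spec.Seg_DGifDecompressLine
namespace Gif.Spec.DGifDecompressLine_P
open X86 X86.User Asan

/-- The statement of unit `DGifDecompressLine.P`. -/
def Statement : Prop :=
  ∀ (Lay : Layout) (_hLay : Lay.hi = 0x1000000) (μ : Microarch) (_hμ : UserX.MicroOK μ) (u₀ : State)
    (_hcode : HasCodeNat Lay u₀ Gif.L.DGifDecompressLine.entry Gif.Code.code_DGifDecompressLine.nat Gif.L.DGifDecompressLine.size),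
    Gif.Spec.DGifDecompressLine.SegP Lay μ u₀

end Gif.Spec.DGifDecompressLine_P
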